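-- pv_equiv track=rewrite | github.com/IanJunji/Problema_dos_clashs | markup_generator.py | separar_layers
-- ===== SOURCE A (Python) =====
-- from collections import defaultdict
--
-- def separar_layers(clashs):
--     disciplinas_layers = defaultdict(list)
--     for clash in clashs:
--         layers_disciplinas = []
--         if 'disciplina_1' in clash and 'layer_1' in clash:
--             layers_disciplinas.append((clash['layer_1'], clash['disciplina_1']))
--         if 'disciplina_2' in clash and 'layer_2' in clash:
--             layers_disciplinas.append((clash['layer_2'], clash['disciplina_2']))
--         for layer, disciplina in layers_disciplinas:
--             if layer not in disciplinas_layers[disciplina]: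
--                 disciplinas_layers[disciplina].append(layer)
--     return dict(disciplinas_layers)
-- ===== SOURCE B (Python) =====
-- from collections import defaultdict
--
-- def separar_layers(clashs):
--     # phase 1: collect every present layer per discipline, duplicates kept
--     table = defaultdict(list)
--     for clash in clashs:
--         if 'disciplina_1' in clash and 'layer_1' in clash:
--             table[clash['disciplina_1']].append(clash['layer_1'])
--         if 'disciplina_2' in clash and 'layer_2' in clash:
--             table[clash['disciplina_2']].append(clash['layer_2'])
--     # phase 2: ordered dedup per discipline
--     return {d: list(dict.fromkeys(layers)) for d, layers in table.items()}
-- ===== Notes on version B (the rewrite author's own statement) =====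
-- stated objective: alternative
-- what changed: A dedups on the fly with a per-pair 'layer not in list' membership test inside the loop; B first collects all layers per discipline with plain appends (duplicates kept) and then deduplicates each list in a separate second pass via dict.fromkeys.
import Mathlib
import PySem

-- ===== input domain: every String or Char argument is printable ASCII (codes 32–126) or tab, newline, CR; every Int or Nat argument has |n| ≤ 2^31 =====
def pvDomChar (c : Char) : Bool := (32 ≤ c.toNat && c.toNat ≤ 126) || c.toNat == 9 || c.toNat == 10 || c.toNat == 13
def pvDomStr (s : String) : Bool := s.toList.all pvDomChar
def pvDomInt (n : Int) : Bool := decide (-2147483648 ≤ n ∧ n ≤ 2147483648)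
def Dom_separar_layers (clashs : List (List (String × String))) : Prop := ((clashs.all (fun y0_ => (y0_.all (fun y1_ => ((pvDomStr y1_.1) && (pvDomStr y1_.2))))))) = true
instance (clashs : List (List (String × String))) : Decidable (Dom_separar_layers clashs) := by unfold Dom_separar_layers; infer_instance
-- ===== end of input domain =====

-- B replaces A's in-loop membership-test dedup by a collect-all grouping pass followed by a separate ordered-dedup pass per discipline (alternative decomposition, same cost).


-- ===== PORT A =====
def pvHas (clash : List (String × String)) (k : String) : Bool := (clash.lookup k).isSome
def pvGet (clash : List (String × String)) (k : String) : String := (clash.lookup k).getD ""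

def separar_layers (clashs : List (List (String × String))) : List (String × List String) :=
  (clashs.foldl
    (fun (d : PySem.Dict String (List String)) clash =>
      let lds : List (String × String) :=
        (if pvHas clash "disciplina_1" && pvHas clash "layer_1"
         then [(pvGet clash "layer_1", pvGet clash "disciplina_1")] else []) ++
        (if pvHas clash "disciplina_2" && pvHas clash "layer_2"
         then [(pvGet clash "layer_2", pvGet clash "disciplina_2")] else [])
      lds.foldl
        (fun d p =>
          if (d.getD p.2 []).contains p.1 then d
          else d.modify p.2 [] (· ++ [p.1])) d)
    PySem.Dict.empty).items

-- ===== PORT B =====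
def separar_layers_alt (clashs : List (List (String × String))) : List (String × List String) :=
  let table : PySem.Dict String (List String) :=
    clashs.foldl
      (fun d clash =>
        let d := if pvHas clash "disciplina_1" && pvHas clash "layer_1"
                 then d.modify (pvGet clash "disciplina_1") [] (· ++ [pvGet clash "layer_1"]) else d
        if pvHas clash "disciplina_2" && pvHas clash "layer_2"
        then d.modify (pvGet clash "disciplina_2") [] (· ++ [pvGet clash "layer_2"]) else d)
      PySem.Dict.empty
  table.items.map (fun p => (p.1, PySem.List.dedup p.2))

-- ===== PRECONDITION & SPEC =====
def Spec_separar_layers (clashs : List (List (String × String))) (out : List (String × List String)) : Prop := out = separar_layers_alt clashs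
instance (clashs : List (List (String × String))) (out : List (String × List String)) : Decidable (Spec_separar_layers clashs out) := by unfold Spec_separar_layers; infer_instance

-- ===== CLAIM =====
def Claim_equal_separar_layers : Prop := ∀ (clashs : List (List (String × String))), Dom_separar_layers clashs → Spec_separar_layers clashs (separar_layers clashs)

-- ===== LEMMAS AND PROOFS =====

-- A's inner loop step on one (layer, disciplina) pair
def pvStepA (d : PySem.Dict String (List String)) (p : String × String) : PySem.Dict String (List String) :=
  if (d.getD p.2 []).contains p.1 then d else d.modify p.2 [] (· ++ [p.1])

-- B's table step on one (disciplina, layer) pair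
def pvStepB (d : PySem.Dict String (List String)) (p : String × String) : PySem.Dict String (List String) :=
  d.modify p.1 [] (· ++ [p.2])

-- the (disciplina, layer) pairs a single clash contributes (B's orientation)
def pvLds (clash : List (String × String)) : List (String × String) :=
  (if pvHas clash "disciplina_1" && pvHas clash "layer_1"
   then [(pvGet clash "disciplina_1", pvGet clash "layer_1")] else []) ++
  (if pvHas clash "disciplina_2" && pvHas clash "layer_2"
   then [(pvGet clash "disciplina_2", pvGet clash "layer_2")] else [])

theorem foldl_foldl_flatMap {α β γ : Type} (g : α → List β) (s : γ → β → γ) :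
    ∀ (l : List α) (d : γ), l.foldl (fun d x => (g x).foldl s d) d = (l.flatMap g).foldl s d := by
  intro l
  induction l with
  | nil => intro d; rfl
  | cons a t ih => intro d; simp [List.flatMap_cons, List.foldl_append, ih]

theorem foldA_eq (clashs : List (List (String × String))) (d : PySem.Dict String (List String)) :
    clashs.foldl
      (fun d clash =>
        ((if pvHas clash "disciplina_1" && pvHas clash "layer_1"
          then [(pvGet clash "layer_1", pvGet clash "disciplina_1")] else []) ++
         (if pvHas clash "disciplina_2" && pvHas clash "layer_2"
          then [(pvGet clash "layer_2", pvGet clash "disciplina_2")] else [])).foldl pvStepA d) d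
    = ((clashs.flatMap pvLds).map Prod.swap).foldl pvStepA d := by
  rw [List.map_flatMap]
  rw [← foldl_foldl_flatMap (fun c => (pvLds c).map Prod.swap) pvStepA]
  apply congrArg (fun f => List.foldl f d clashs)
  funext d clash
  unfold pvLds
  by_cases h1 : (pvHas clash "disciplina_1" && pvHas clash "layer_1") = true <;>
    by_cases h2 : (pvHas clash "disciplina_2" && pvHas clash "layer_2") = true <;>
    simp [h1, h2]

theorem foldB_eq (clashs : List (List (String × String))) (d : PySem.Dict String (List String)) :
    clashs.foldl
      (fun d clash =>
        let d := if pvHas clash "disciplina_1" && pvHas clash "layer_1"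
                 then d.modify (pvGet clash "disciplina_1") [] (· ++ [pvGet clash "layer_1"]) else d
        if pvHas clash "disciplina_2" && pvHas clash "layer_2"
        then d.modify (pvGet clash "disciplina_2") [] (· ++ [pvGet clash "layer_2"]) else d) d
    = (clashs.flatMap pvLds).foldl pvStepB d := by
  rw [← foldl_foldl_flatMap pvLds pvStepB]
  apply congrArg (fun f => List.foldl f d clashs)
  funext d clash
  unfold pvLds pvStepB
  by_cases h1 : (pvHas clash "disciplina_1" && pvHas clash "layer_1") = true <;>
    by_cases h2 : (pvHas clash "disciplina_2" && pvHas clash "layer_2") = true <;>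
    simp [h1, h2]

theorem stepA_getD_self (d : PySem.Dict String (List String)) (b c : String) :
    (pvStepA d (b, c)).getD c [] = PySem.Set.add (d.getD c []) b := by
  unfold pvStepA
  by_cases hb : b ∈ d.getD c []
  · simp [hb, PySem.Set.add, PySem.Set.contains]
  · simp [hb, PySem.Set.add, PySem.Set.contains, PySem.Dict.getD_modify_self]

theorem stepA_getD_ne (d : PySem.Dict String (List String)) (b a c : String) (h : c ≠ a) :
    (pvStepA d (b, a)).getD c [] = d.getD c [] := by
  unfold pvStepA
  split
  · rfl
  · exact PySem.Dict.getD_modify_of_ne d [] _ h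

theorem stepA_keys (d : PySem.Dict String (List String)) (b a : String) :
    (pvStepA d (b, a)).keys = PySem.Set.add d.keys a := by
  unfold pvStepA
  by_cases hb : b ∈ d.getD a []
  · have hc : d.contains a = true := by
      by_contra h
      rw [PySem.Dict.getD_of_not_contains d ([] : List String) (by simpa using h)] at hb
      simp at hb
    have hm : a ∈ d.keys := (PySem.Dict.contains_iff_mem_keys d a).1 hc
    simp [hb, PySem.Set.add, PySem.Set.contains, hm]
  · rw [if_neg (by simpa using hb), PySem.Dict.keys_modify]
    by_cases hc : d.contains a = true
    · have hm : a ∈ d.keys := (PySem.Dict.contains_iff_mem_keys d a).1 hc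
      rw [PySem.Dict.keys_insert_of_contains d _ hc]
      simp [PySem.Set.add, PySem.Set.contains, hm]
    · have hm : a ∉ d.keys := fun h => hc ((PySem.Dict.contains_iff_mem_keys d a).2 h)
      rw [PySem.Dict.keys_insert_of_not_contains d _ (by simpa using hc)]
      simp [PySem.Set.add, PySem.Set.contains, hm]

theorem getD_foldA (c : String) :
    ∀ (ps : List (String × String)) (d : PySem.Dict String (List String)),
      ((ps.map Prod.swap).foldl pvStepA d).getD c []
        = PySem.Set.update (d.getD c []) ((ps.filter (fun p => p.1 == c)).map (·.2)) := by
  intro ps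
  induction ps with
  | nil => intro d; rfl
  | cons p t ih =>
    intro d
    obtain ⟨a, b⟩ := p
    simp only [List.map_cons, List.foldl_cons, Prod.swap, List.filter_cons]
    by_cases h : a = c
    · subst h
      rw [if_pos (by simp), List.map_cons]
      rw [ih, stepA_getD_self]
      rfl
    · rw [if_neg (by simpa using h)]
      rw [ih, stepA_getD_ne d b a c (Ne.symm h)]

theorem keys_foldA :
    ∀ (ps : List (String × String)) (d : PySem.Dict String (List String)),
      ((ps.map Prod.swap).foldl pvStepA d).keys = PySem.Set.update d.keys (ps.map (·.1)) := by
  intro ps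
  induction ps with
  | nil => intro d; rfl
  | cons p t ih =>
    intro d
    obtain ⟨a, b⟩ := p
    simp only [List.map_cons, List.foldl_cons, Prod.swap]
    rw [ih, stepA_keys]
    rfl

theorem update_nil_eq_dedup (xs : List String) : PySem.Set.update [] xs = PySem.List.dedup xs := by
  simp [PySem.List.dedup_eq_ofList, PySem.Set.ofList_eq_foldl, PySem.Set.update]

theorem items_key (P : List (String × String)) :
    ((P.map Prod.swap).foldl pvStepA PySem.Dict.empty).items
      = ((P.foldl pvStepB PySem.Dict.empty).items).map (fun p => (p.1, PySem.List.dedup p.2)) := by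
  have hAk : ((P.map Prod.swap).foldl pvStepA PySem.Dict.empty).keys
      = PySem.Set.ofList (P.map (·.1)) := by
    rw [keys_foldA, PySem.Dict.keys_empty, PySem.Set.ofList_eq_foldl]
    rfl
  have hBg : ∀ k, (P.foldl pvStepB PySem.Dict.empty).getD k []
      = (P.filter (fun p => p.1 == k)).map (·.2) := by
    intro k
    unfold pvStepB
    rw [PySem.Dict.getD_foldl_modify_append, PySem.Dict.getD_empty]
    rfl
  have hBk : (P.foldl pvStepB PySem.Dict.empty).keys = PySem.Set.ofList (P.map (·.1)) := by
    unfold pvStepB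
    rw [PySem.Dict.keys_foldl_modify_key P (·.1) [] (fun _ p => (· ++ [p.2])),
        PySem.Dict.keys_empty, PySem.Set.ofList_eq_foldl]
    rfl
  rw [PySem.Dict.items_eq_map_keys _ (by rw [hAk]; exact PySem.Set.nodup_ofList _) [],
      PySem.Dict.items_eq_map_keys _ (by rw [hBk]; exact PySem.Set.nodup_ofList _) [],
      hAk, hBk, List.map_map]
  apply List.map_congr_left
  intro k _
  simp only [Function.comp]
  rw [getD_foldA, PySem.Dict.getD_empty, hBg, update_nil_eq_dedup]

-- ===== VERDICT =====
theorem separar_layers_spec : Claim_equal_separar_layers := by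
  intro clashs _
  unfold Spec_separar_layers
  calc separar_layers clashs
      = (((clashs.flatMap pvLds).map Prod.swap).foldl pvStepA PySem.Dict.empty).items :=
        congrArg PySem.Dict.items (foldA_eq clashs PySem.Dict.empty)
    _ = (((clashs.flatMap pvLds).foldl pvStepB PySem.Dict.empty).items).map
          (fun p => (p.1, PySem.List.dedup p.2)) := items_key _
    _ = separar_layers_alt clashs :=
        (congrArg (fun d => d.items.map (fun p => (p.1, PySem.List.dedup p.2)))
          (foldB_eq clashs PySem.Dict.empty)).symm
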